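-- pv_equiv track=rewrite | github.com/huangbinapple/codeforce | 547_e.py | helper
-- ===== SOURCE A (Python) =====
-- def helper(dl, H):
--     min_index, min_value = 0, 0
--     acc_sum = 0
--     kill_index = -1
--     kill_flag = True
--     for i in range(len(dl)):
--         acc_sum += dl[i]
--         if kill_flag and acc_sum + H <= 0:
--             kill_index = i + 1
--             kill_flag = False
--         if acc_sum < min_value:
--             min_value = acc_sum
--             min_index = i
--     return min_value, min_index + 1, kill_index, dl[min_index + 1:] + dl[:min_index + 1]
-- ===== SOURCE B (Python) =====
-- def helper(dl, H):
--     prefix = []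
--     s = 0
--     for x in dl:
--         s += x
--         prefix.append(s)
--     if any(p < 0 for p in prefix):
--         min_value = min(prefix)
--         min_index = prefix.index(min_value)
--     else:
--         min_value, min_index = 0, 0
--     kill_index = next((i + 1 for i, p in enumerate(prefix) if p + H <= 0), -1)
--     return min_value, min_index + 1, kill_index, dl[min_index + 1:] + dl[:min_index + 1]
-- ===== Notes on version B (the rewrite author's own statement) =====
-- stated objective: alternative
-- what changed: A's single fused loop (running sum, running strict minimum with index, one-shot kill flag) is decomposed into building the prefix-sum list once and then three independent readings of it: any/min/index for the minimum and its first index, and a generator-next search for the kill index.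
import Mathlib
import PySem

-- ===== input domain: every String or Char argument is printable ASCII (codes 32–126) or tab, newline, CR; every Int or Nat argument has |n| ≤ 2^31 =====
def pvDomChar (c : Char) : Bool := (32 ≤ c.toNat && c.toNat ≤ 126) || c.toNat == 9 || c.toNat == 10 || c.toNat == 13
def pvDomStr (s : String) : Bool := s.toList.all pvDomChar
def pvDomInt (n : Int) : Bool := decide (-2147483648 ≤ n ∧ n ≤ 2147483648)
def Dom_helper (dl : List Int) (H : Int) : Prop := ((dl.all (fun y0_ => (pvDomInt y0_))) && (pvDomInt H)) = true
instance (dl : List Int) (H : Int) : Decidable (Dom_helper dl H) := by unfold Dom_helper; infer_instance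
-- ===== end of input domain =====

-- B re-decomposes A's single fused loop into: build the prefix-sum list, then min/first-index
-- over it, then a separate first-hit search for the kill index (same values, alternative structure).

-- B re-decomposes A's single fused scan into: build the prefix-sum list, then min + first-index
-- over it, then a separate first-hit search for the kill index (same return value, alternative structure).

-- ===== PORT A =====
-- loop state: (min_index, min_value, acc_sum, kill_index, kill_flag)
def helperStep (H : Int) (dl : List Int) (st : Int × Int × Int × Int × Bool) (i : Int) :
    Int × Int × Int × Int × Bool :=
  let acc := st.2.2.1 + PySem.List.pyGetD dl i 0
  let kf : Int × Bool :=
    if st.2.2.2.2 && decide (acc + H ≤ 0) then (i + 1, false) else (st.2.2.2.1, st.2.2.2.2)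
  let mvmi : Int × Int := if acc < st.2.1 then (acc, i) else (st.2.1, st.1)
  (mvmi.2, mvmi.1, acc, kf.1, kf.2)
def helper (dl : List Int) (H : Int) : Int × Int × Int × List Int :=
  let st := (PySem.List.pyRange 0 (dl.length : Int) 1).foldl (helperStep H dl) (0, 0, 0, -1, true)
  (st.2.1, st.1 + 1, st.2.2.2.1,
    PySem.List.slice dl (some (st.1 + 1)) none ++ PySem.List.slice dl none (some (st.1 + 1)))

-- ===== PORT B =====
-- the prefix-building loop of Source B, then next(...) as killAux
def accAux (s : Int) : List Int → List Int
  | [] => []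
  | x :: xs => (s + x) :: accAux (s + x) xs
def killAux (H : Int) (i : Int) : List Int → Int
  | [] => -1
  | p :: ps => if p + H ≤ 0 then i + 1 else killAux H (i + 1) ps
def helper_alt (dl : List Int) (H : Int) : Int × Int × Int × List Int :=
  let pre := accAux 0 dl
  let mvmi : Int × Int :=
    if pre.any (fun p => decide (p < 0)) then
      let m := (PySem.List.min? pre (fun y => y)).getD 0
      (m, ((PySem.List.index? pre m).getD 0 : Nat))
    else (0, 0)
  let kill := killAux H 0 pre
  (mvmi.1, mvmi.2 + 1, kill,
    PySem.List.slice dl (some (mvmi.2 + 1)) none ++ PySem.List.slice dl none (some (mvmi.2 + 1)))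

-- ===== PRECONDITION & SPEC =====
def Spec_helper (dl : List Int) (H : Int) (out : Int × Int × Int × List Int) : Prop := out = helper_alt dl H
instance (dl : List Int) (H : Int) (out : Int × Int × Int × List Int) : Decidable (Spec_helper dl H out) := by unfold Spec_helper; infer_instance

-- ===== CLAIM (what is proved, stated in full; the proofs are below) =====
def Claim_equal_helper : Prop := ∀ (dl : List Int) (H : Int), Dom_helper dl H → Spec_helper dl H (helper dl H)

-- ===== LEMMAS AND PROOFS =====

-- structural left-to-right form of A's indexed loop
def loopA (H : Int) (i : Int) (st : Int × Int × Int × Int × Bool) :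
    List Int → Int × Int × Int × Int × Bool
  | [] => st
  | x :: xs =>
      let acc := st.2.2.1 + x
      let kf : Int × Bool :=
        if st.2.2.2.2 && decide (acc + H ≤ 0) then (i + 1, false) else (st.2.2.2.1, st.2.2.2.2)
      let mvmi : Int × Int := if acc < st.2.1 then (acc, i) else (st.2.1, st.1)
      loopA H (i + 1) (mvmi.2, mvmi.1, acc, kf.1, kf.2) xs

def foldMin (i mv mi : Int) : List Int → Int × Int
  | [] => (mv, mi)
  | p :: ps => if p < mv then foldMin (i + 1) p i ps else foldMin (i + 1) mv mi ps

lemma fold_idx (H : Int) (full : List Int) :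
    ∀ (xs : List Int) (a : Nat) (st : Int × Int × Int × Int × Bool), full.drop a = xs →
    (PySem.List.pyRange (a : Int) (full.length : Int) 1).foldl (helperStep H full) st
      = loopA H (a : Int) st xs := by
  intro xs
  induction xs with
  | nil =>
    intro a st h
    have hlen : full.length ≤ a := List.drop_eq_nil_iff.mp h
    rw [PySem.List.pyRange_one_eq_nil (by exact_mod_cast hlen)]
    rfl
  | cons x xs ih =>
    intro a st h
    have ha : a < full.length := by
      have := congrArg List.length h
      simp [List.length_drop] at this; omega
    have hx : PySem.List.pyGetD full (a : Int) 0 = x := by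
      rw [PySem.List.pyGetD_natCast]
      have : full.drop a = x :: xs := h
      have h0 : full[a]'ha = x := by
        have h1 : (full.drop a)[0]'(by rw [h]; simp) = x := by simp [h]
        simpa using h1
      simp [List.getD_eq_getElem?_getD, List.getElem?_eq_getElem ha, h0]
    have hdrop : full.drop (a+1) = xs := by
      have : (full.drop a).drop 1 = xs := by rw [h]; rfl
      rwa [List.drop_drop] at this
    rw [PySem.List.pyRange_one_cons (by exact_mod_cast ha)]
    simp only [List.foldl_cons]
    have hcast : ((a : Int) + 1) = ((a + 1 : Nat) : Int) := by push_cast; ring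
    rw [show (helperStep H full st (a:Int)) = _ from rfl]
    rw [loopA]
    simp only [helperStep, hx, hcast]
    exact ih (a+1) _ hdrop

lemma loopA_kill_false (H : Int) :
    ∀ (xs : List Int) (i acc mi mv k : Int),
    (loopA H i (mi, mv, acc, k, false) xs).2.2.2.1 = k := by
  intro xs
  induction xs with
  | nil => intro i acc mi mv k; simp [loopA]
  | cons x xs ih =>
    intro i acc mi mv k
    rw [loopA]
    by_cases hm : acc + x < mv <;> simp [hm, ih]

lemma loopA_kill (H : Int) :
    ∀ (xs : List Int) (i acc mi mv : Int),
    (loopA H i (mi, mv, acc, -1, true) xs).2.2.2.1 = killAux H i (accAux acc xs) := by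
  intro xs
  induction xs with
  | nil => intro i acc mi mv; simp [loopA, accAux, killAux]
  | cons x xs ih =>
    intro i acc mi mv
    rw [loopA]
    simp only [accAux, killAux]
    by_cases hk : acc + x + H ≤ 0 <;>
      simp [hk, ih, loopA_kill_false]

lemma loopA_min (H : Int) :
    ∀ (xs : List Int) (i acc mi mv k : Int) (fl : Bool),
    ((loopA H i (mi, mv, acc, k, fl) xs).2.1, (loopA H i (mi, mv, acc, k, fl) xs).1)
      = foldMin i mv mi (accAux acc xs) := by
  intro xs
  induction xs with
  | nil => intro i acc mi mv k fl; simp [loopA, accAux, foldMin]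
  | cons x xs ih =>
    intro i acc mi mv k fl
    rw [loopA]
    simp only [accAux, foldMin]
    by_cases hm : acc + x < mv <;> simp [hm, ih]

lemma fmin_le_init : ∀ (t : List Int) (x : Int), t.foldl min x ≤ x := by
  intro t
  induction t with
  | nil => intro x; simp
  | cons c t ih =>
    intro x
    simp only [List.foldl_cons]
    exact le_trans (ih (min x c)) (min_le_left _ _)

lemma fmin_le_mem : ∀ (t : List Int) (x y : Int), y ∈ t → t.foldl min x ≤ y := by
  intro t
  induction t with
  | nil => intro x y h; simp at h
  | cons c t ih =>
    intro x y h
    rcases List.mem_cons.mp h with rfl | h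
    · exact le_trans (fmin_le_init t (min x y)) (min_le_right _ _)
    · exact ih (min x c) y h

lemma fmin_eq_init : ∀ (t : List Int) (x : Int), (∀ y ∈ t, x ≤ y) → t.foldl min x = x := by
  intro t
  induction t with
  | nil => intro x _; rfl
  | cons c t ih =>
    intro x h
    simp only [List.foldl_cons]
    rw [min_eq_left (h c (by simp))]
    exact ih x (fun y hy => h y (by simp [hy]))

lemma fmin_mem : ∀ (t : List Int) (x : Int), t.foldl min x ∈ x :: t := by
  intro t
  induction t with
  | nil => intro x; simp
  | cons c t ih =>
    intro x
    simp only [List.foldl_cons]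
    rcases List.mem_cons.mp (ih (min x c)) with h | h
    · rcases min_choice x c with h' | h' <;> rw [h] at * <;> simp [h']
    · simp [h]

lemma fmin_min : ∀ (t : List Int) (a b : Int), t.foldl min (min a b) = min a (t.foldl min b) := by
  intro t
  induction t with
  | nil => intro a b; rfl
  | cons c t ih =>
    intro a b
    simp only [List.foldl_cons]
    rw [min_assoc, ih]

lemma foldMin_spec :
    ∀ (ps : List Int) (i mv mi : Int),
    foldMin i mv mi ps =
      if ps.any (fun p => decide (p < mv)) then
        ((PySem.List.min? ps (fun y => y)).getD 0,
          i + (((PySem.List.index? ps ((PySem.List.min? ps (fun y => y)).getD 0)).getD 0 : Nat) : Int))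
      else (mv, mi) := by
  intro ps
  induction ps with
  | nil => intro i mv mi; simp [foldMin]
  | cons p ps ih =>
    intro i mv mi
    rw [foldMin]
    by_cases hp : p < mv
    · rw [if_pos hp, ih, if_pos (by simp [hp] : ((p :: ps).any fun p => decide (p < mv)) = true)]
      by_cases h2 : ps.any (fun q => decide (q < p))
      · rw [if_pos h2]
        obtain ⟨q, hq, hqlt⟩ : ∃ q ∈ ps, q < p := by simpa using (List.any_eq_true.mp h2)
        obtain ⟨u, us, rfl⟩ : ∃ u us, ps = u :: us := by
          cases ps with
          | nil => simp at hq
          | cons u us => exact ⟨u, us, rfl⟩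
        rw [PySem.List.min?_id_cons, PySem.List.min?_id_cons]
        simp only [Option.getD_some, List.foldl_cons]
        have hlt : us.foldl min u < p := by
          rcases List.mem_cons.mp hq with h | h'
          · exact lt_of_le_of_lt (fmin_le_init us u) (h ▸ hqlt)
          · exact lt_of_le_of_lt (fmin_le_mem us u q h') hqlt
        have hmin : us.foldl min (min p u) = us.foldl min u := by
          rw [fmin_min, min_eq_right (le_of_lt hlt)]
        rw [hmin]
        rw [PySem.List.index?_cons_of_ne _ (ne_of_gt hlt)]
        obtain ⟨j, hj⟩ := Option.isSome_iff_exists.mp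
          ((PySem.List.index?_isSome_iff _ _).mpr (fmin_mem us u))
        rw [hj]
        simp only [Option.map_some, Option.getD_some]
        simp only [Prod.mk.injEq]
        exact ⟨trivial, by push_cast; ring⟩
      · rw [if_neg h2]
        have hall : ∀ y ∈ ps, p ≤ y := by
          intro y hy
          by_contra hc
          exact h2 (List.any_eq_true.mpr ⟨y, hy, by simp; omega⟩)
        have hminp : (PySem.List.min? (p :: ps) fun y => y).getD 0 = p := by
          rw [PySem.List.min?_id_cons, Option.getD_some]
          exact fmin_eq_init ps p hall
        rw [hminp, PySem.List.index?_cons_self]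
        simp
    · rw [if_neg hp, ih]
      by_cases h2 : ps.any (fun q => decide (q < mv))
      · rw [if_pos h2, if_pos (by simp [h2] : ((p :: ps).any fun p => decide (p < mv)) = true)]
        obtain ⟨q, hq, hqlt⟩ : ∃ q ∈ ps, q < mv := by simpa using (List.any_eq_true.mp h2)
        obtain ⟨u, us, rfl⟩ : ∃ u us, ps = u :: us := by
          cases ps with
          | nil => simp at hq
          | cons u us => exact ⟨u, us, rfl⟩
        rw [PySem.List.min?_id_cons, PySem.List.min?_id_cons]
        simp only [Option.getD_some, List.foldl_cons]
        have hlt : us.foldl min u < mv := by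
          rcases List.mem_cons.mp hq with h | h'
          · exact lt_of_le_of_lt (fmin_le_init us u) (h ▸ hqlt)
          · exact lt_of_le_of_lt (fmin_le_mem us u q h') hqlt
        have hlt' : us.foldl min u < p := lt_of_lt_of_le hlt (le_of_not_gt hp)
        have hmin : us.foldl min (min p u) = us.foldl min u := by
          rw [fmin_min, min_eq_right (le_of_lt hlt')]
        rw [hmin]
        rw [PySem.List.index?_cons_of_ne _ (ne_of_gt hlt')]
        obtain ⟨j, hj⟩ := Option.isSome_iff_exists.mp
          ((PySem.List.index?_isSome_iff _ _).mpr (fmin_mem us u))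
        rw [hj]
        simp only [Option.map_some, Option.getD_some]
        simp only [Prod.mk.injEq]
        exact ⟨trivial, by push_cast; ring⟩
      · rw [if_neg h2, if_neg (by
          simp only [List.any_cons, Bool.or_eq_true, decide_eq_true_eq]
          rintro (h | h)
          · exact hp h
          · exact h2 h)]


lemma helper_eq_alt (dl : List Int) (H : Int) : helper dl H = helper_alt dl H := by
  unfold helper helper_alt
  have h0 : (PySem.List.pyRange 0 (dl.length : Int) 1).foldl (helperStep H dl) (0, 0, 0, -1, true)
      = loopA H 0 (0, 0, 0, -1, true) dl := by
    have h := fold_idx H dl dl 0 (0, 0, 0, -1, true) (by simp)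
    simpa using h
  have hk := loopA_kill H dl 0 0 0 0
  have hm := loopA_min H dl 0 0 0 0 (-1) true
  rw [foldMin_spec] at hm
  by_cases hc : (accAux 0 dl).any (fun p => decide (p < 0))
  · rw [if_pos hc] at hm
    simp only [Prod.mk.injEq] at hm
    simp only [h0, if_pos hc, hm.1, hm.2, hk, zero_add]
  · rw [if_neg hc] at hm
    simp only [Prod.mk.injEq] at hm
    simp only [h0, if_neg hc, hm.1, hm.2, hk]

-- ===== VERDICT (by name: the statement is the Claim_ definition above) =====
theorem helper_spec : Claim_equal_helper := by
  intro dl H _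
  exact helper_eq_alt dl H
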